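-- pv_equiv track=rewrite | github.com/NabaviLab/CNV-Sim | lib/exome_simulator.py | simulateCNV
-- ===== SOURCE A (Python) =====
-- def simulateCNV(genome, cnv_matrix, mask):
--     '''
--     This function creates two new genome references and target files for control and CNV
--     :param genome: text string of the genome
--     :param cnv_matrix: A matrix where rows represent the region index and the first column as a list of targets in this region
--     :param mask: a list to indicate the variations introduced to each CNV region
--     :return: control genome, control target list, modified genome and modified target list (in order)
--     '''
--
--     control_genome = []
--     control_targets = []                # initialize control target list
--     cnv_genome = []
--     cnv_targets = []                    # initialize cnv target list
--
--     CONTROL_APPEND_INDEX = 0  # a value to re-base the (start, end) of amplified/deleted targets in a region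
--     CNV_APPEND_INDEX = 0          # a value to re-base the (start, end) of amplified/deleted targets in a region
--
--     for k, cnv_region in enumerate(cnv_matrix):
--
--         number_of_copies = mask[k]
--
--         if number_of_copies > 0:
--             # if amplification, it will enter this loop
--             for target in cnv_region:
--                 for _ in range(number_of_copies):
--                     amplification = genome[target[1]-100:target[2]+100]
--                     cnv_genome.append(amplification)
--                     chromosome = target[0]
--                     start = CNV_APPEND_INDEX + 100
--                     end = CNV_APPEND_INDEX + len(amplification) - 100
--                     cnv_targets.append((chromosome, start, end))
--                     CNV_APPEND_INDEX += len(amplification)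
--         elif number_of_copies < 0:
--             # if deletion, it will enter this loop
--             for target in cnv_region:
--                 for _ in range(abs(number_of_copies)):
--                     deletion = genome[target[1]-100:target[2]+100]
--                     control_genome.append(deletion)
--                     chromosome = target[0]
--                     start = CONTROL_APPEND_INDEX + 100
--                     end = CONTROL_APPEND_INDEX + len(deletion) - 100
--                     control_targets.append((chromosome, start, end))
--                     CONTROL_APPEND_INDEX += len(deletion)
--
--     return ''.join(control_genome), control_targets, ''.join(cnv_genome), cnv_targets
-- ===== SOURCE B (Python) =====
-- def simulateCNV(genome, cnv_matrix, mask):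
--     '''
--     Two-pass decomposition: first collect the ordered (chromosome, slice) pieces
--     of each stream, then rebase targets from cumulative slice-length offsets.
--     '''
--     control_pieces = []             # (chromosome, sequence) pairs, in emission order
--     cnv_pieces = []
--
--     # pass 1: build the slice lists
--     for cnv_region, number_of_copies in zip(cnv_matrix, mask):
--         if number_of_copies > 0:
--             for target in cnv_region:
--                 piece = (target[0], genome[target[1]-100:target[2]+100])
--                 cnv_pieces.extend([piece] * number_of_copies)
--         elif number_of_copies < 0:
--             for target in cnv_region:
--                 piece = (target[0], genome[target[1]-100:target[2]+100])
--                 control_pieces.extend([piece] * (-number_of_copies))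
--
--     # pass 2: rebase target coordinates from the prefix sums of the slice lengths
--     def rebase(pieces):
--         targets = []
--         offset = 0
--         for chromosome, seq in pieces:
--             targets.append((chromosome, offset + 100, offset + len(seq) - 100))
--             offset += len(seq)
--         return ''.join(seq for _, seq in pieces), targets
--
--     control_genome, control_targets = rebase(control_pieces)
--     cnv_genome, cnv_targets = rebase(cnv_pieces)
--     return control_genome, control_targets, cnv_genome, cnv_targets
-- ===== Notes on version B (the rewrite author's own statement) =====
-- stated objective: alternative
-- what changed: Replaces A's single fold carrying two running re-base index accumulators with a two-pass decomposition: first collect each stream's ordered (chromosome, slice) piece list by zipping cnv_matrix with mask, then compute the target tuples in a separate rebase pass from the cumulative prefix sums of the slice lengths, and join the pieces.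
import Mathlib
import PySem

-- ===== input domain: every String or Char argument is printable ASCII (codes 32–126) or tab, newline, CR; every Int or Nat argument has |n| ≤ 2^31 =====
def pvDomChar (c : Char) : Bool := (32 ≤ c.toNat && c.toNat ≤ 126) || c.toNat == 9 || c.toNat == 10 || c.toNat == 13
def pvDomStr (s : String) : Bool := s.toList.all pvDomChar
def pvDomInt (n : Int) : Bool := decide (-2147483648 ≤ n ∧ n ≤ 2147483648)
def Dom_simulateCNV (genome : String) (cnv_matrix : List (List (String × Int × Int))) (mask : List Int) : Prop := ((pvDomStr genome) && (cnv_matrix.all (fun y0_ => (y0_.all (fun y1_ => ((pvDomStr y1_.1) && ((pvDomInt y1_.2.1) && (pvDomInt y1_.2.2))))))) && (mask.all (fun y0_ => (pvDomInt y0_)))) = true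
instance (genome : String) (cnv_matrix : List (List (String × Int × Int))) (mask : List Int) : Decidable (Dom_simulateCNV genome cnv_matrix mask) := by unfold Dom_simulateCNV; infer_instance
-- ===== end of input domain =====

-- B rebuilds the result in two passes (collect pieces, then rebase targets from prefix offsets)
-- instead of A's single fold with two running index accumulators; same cost, different decomposition.

-- ===== PORT A =====
-- the state is (control_genome, control_targets, cnv_genome, cnv_targets, CONTROL_APPEND_INDEX, CNV_APPEND_INDEX)
def pvAmpStep (genome : String) (target : String × Int × Int)
    (st : List String × List (String × Int × Int) × List String × List (String × Int × Int) × Int × Int)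
    (_ : Int) : List String × List (String × Int × Int) × List String × List (String × Int × Int) × Int × Int :=
  let amplification := PySem.Str.slice genome (some (target.2.1 - 100)) (some (target.2.2 + 100))
  (st.1, st.2.1, st.2.2.1 ++ [amplification],
   st.2.2.2.1 ++ [(target.1, st.2.2.2.2.2 + 100, st.2.2.2.2.2 + (PySem.Str.len amplification : Int) - 100)],
   st.2.2.2.2.1, st.2.2.2.2.2 + (PySem.Str.len amplification : Int))

def pvDelStep (genome : String) (target : String × Int × Int)
    (st : List String × List (String × Int × Int) × List String × List (String × Int × Int) × Int × Int)
    (_ : Int) : List String × List (String × Int × Int) × List String × List (String × Int × Int) × Int × Int :=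
  let deletion := PySem.Str.slice genome (some (target.2.1 - 100)) (some (target.2.2 + 100))
  (st.1 ++ [deletion],
   st.2.1 ++ [(target.1, st.2.2.2.2.1 + 100, st.2.2.2.2.1 + (PySem.Str.len deletion : Int) - 100)],
   st.2.2.1, st.2.2.2.1, st.2.2.2.2.1 + (PySem.Str.len deletion : Int), st.2.2.2.2.2)

def pvAmpTarget (genome : String) (number_of_copies : Int)
    (st : List String × List (String × Int × Int) × List String × List (String × Int × Int) × Int × Int)
    (target : String × Int × Int) : List String × List (String × Int × Int) × List String × List (String × Int × Int) × Int × Int :=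
  (PySem.List.pyRange 0 number_of_copies 1).foldl (pvAmpStep genome target) st

def pvDelTarget (genome : String) (number_of_copies : Int)
    (st : List String × List (String × Int × Int) × List String × List (String × Int × Int) × Int × Int)
    (target : String × Int × Int) : List String × List (String × Int × Int) × List String × List (String × Int × Int) × Int × Int :=
  (PySem.List.pyRange 0 |number_of_copies| 1).foldl (pvDelStep genome target) st

def pvAStep (genome : String) (mask : List Int)
    (st : List String × List (String × Int × Int) × List String × List (String × Int × Int) × Int × Int)
    (kr : Int × List (String × Int × Int)) : List String × List (String × Int × Int) × List String × List (String × Int × Int) × Int × Int :=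
  let number_of_copies := PySem.List.pyGetD mask kr.1 0
  if number_of_copies > 0 then kr.2.foldl (pvAmpTarget genome number_of_copies) st
  else if number_of_copies < 0 then kr.2.foldl (pvDelTarget genome number_of_copies) st
  else st

def simulateCNV (genome : String) (cnv_matrix : List (List (String × Int × Int))) (mask : List Int) : String × (List (String × Int × Int)) × String × (List (String × Int × Int)) :=
  let st := (PySem.List.enumerate cnv_matrix 0).foldl (pvAStep genome mask)
    (([] : List String), ([] : List (String × Int × Int)), ([] : List String), ([] : List (String × Int × Int)), (0 : Int), (0 : Int))
  (PySem.Str.join "" st.1, st.2.1, PySem.Str.join "" st.2.2.1, st.2.2.2.1)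

-- ===== PORT B =====
def pvPieceOf (genome : String) (target : String × Int × Int) : String × String :=
  (target.1, PySem.Str.slice genome (some (target.2.1 - 100)) (some (target.2.2 + 100)))

-- pass 1: ordered (chromosome, sequence) pieces of the two streams
def pvBuildPieces (genome : String) (cnv_matrix : List (List (String × Int × Int))) (mask : List Int) :
    List (String × String) × List (String × String) :=
  (cnv_matrix.zip mask).foldl (fun ps rm =>
    if rm.2 > 0 then
      (ps.1, rm.1.foldl (fun acc target => acc ++ PySem.List.pyRepeat [pvPieceOf genome target] rm.2) ps.2)
    else if rm.2 < 0 then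
      (rm.1.foldl (fun acc target => acc ++ PySem.List.pyRepeat [pvPieceOf genome target] (-rm.2)) ps.1, ps.2)
    else ps) (([] : List (String × String)), ([] : List (String × String)))

-- pass 2: rebase the targets from the cumulative offsets of the slice lengths
def pvRebase (pieces : List (String × String)) : String × List (String × Int × Int) :=
  let tp := pieces.foldl (fun st p =>
      (st.1 ++ [(p.1, st.2 + 100, st.2 + (PySem.Str.len p.2 : Int) - 100)], st.2 + (PySem.Str.len p.2 : Int)))
    (([] : List (String × Int × Int)), (0 : Int))
  (PySem.Str.join "" (pieces.map (·.2)), tp.1)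

def simulateCNV_alt (genome : String) (cnv_matrix : List (List (String × Int × Int))) (mask : List Int) : String × (List (String × Int × Int)) × String × (List (String × Int × Int)) :=
  let ps := pvBuildPieces genome cnv_matrix mask
  let c := pvRebase ps.1
  let g := pvRebase ps.2
  (c.1, c.2, g.1, g.2)

-- ===== PRECONDITION & SPEC =====
-- Pre_ excludes only the inputs where A raises IndexError: mask shorter than cnv_matrix.
def Pre_simulateCNV (genome : String) (cnv_matrix : List (List (String × Int × Int))) (mask : List Int) : Prop :=
  cnv_matrix.length ≤ mask.length
instance (genome : String) (cnv_matrix : List (List (String × Int × Int))) (mask : List Int) : Decidable (Pre_simulateCNV genome cnv_matrix mask) := by unfold Pre_simulateCNV; infer_instance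

def pvWitness_simulateCNV : String × (List (List (String × Int × Int))) × List Int :=
  ("ACGTACGT", [[("chr1", 1, 3)]], [2])

def Spec_simulateCNV (genome : String) (cnv_matrix : List (List (String × Int × Int))) (mask : List Int) (out : String × (List (String × Int × Int)) × String × (List (String × Int × Int))) : Prop := out = simulateCNV_alt genome cnv_matrix mask
instance (genome : String) (cnv_matrix : List (List (String × Int × Int))) (mask : List Int) (out : String × (List (String × Int × Int)) × String × (List (String × Int × Int))) : Decidable (Spec_simulateCNV genome cnv_matrix mask out) := by unfold Spec_simulateCNV; infer_instance

-- ===== CLAIM (what is proved, stated in full; the proofs are below) =====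
def Claim_equal_simulateCNV : Prop := ∀ (genome : String) (cnv_matrix : List (List (String × Int × Int))) (mask : List Int), Dom_simulateCNV genome cnv_matrix mask → Pre_simulateCNV genome cnv_matrix mask → Spec_simulateCNV genome cnv_matrix mask (simulateCNV genome cnv_matrix mask)


-- ===== LEMMAS AND PROOFS =====

-- the canonical piece lists and target rebasing, used to characterise both folds
def pvReb (off : Int) : List (String × String) → List (String × Int × Int)
  | [] => []
  | p :: ps => (p.1, off + 100, off + (PySem.Str.len p.2 : Int) - 100) :: pvReb (off + (PySem.Str.len p.2 : Int)) ps

def pvLen (P : List (String × String)) : Int := (P.map (fun p => (PySem.Str.len p.2 : Int))).sum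

def pvRegP (genome : String) (region : List (String × Int × Int)) (n : Nat) : List (String × String) :=
  region.flatMap (fun t => List.replicate n (pvPieceOf genome t))

def pvCtrlP (genome : String) (L : List (List (String × Int × Int) × Int)) : List (String × String) :=
  L.flatMap (fun rm => if rm.2 < 0 then pvRegP genome rm.1 (-rm.2).toNat else [])
def pvCnvP (genome : String) (L : List (List (String × Int × Int) × Int)) : List (String × String) :=
  L.flatMap (fun rm => if rm.2 > 0 then pvRegP genome rm.1 rm.2.toNat else [])

-- a zip-level restatement of A's region step (mask lookup already resolved)
def pvZStep (genome : String)
    (st : List String × List (String × Int × Int) × List String × List (String × Int × Int) × Int × Int)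
    (rm : List (String × Int × Int) × Int) : List String × List (String × Int × Int) × List String × List (String × Int × Int) × Int × Int :=
  if rm.2 > 0 then rm.1.foldl (pvAmpTarget genome rm.2) st
  else if rm.2 < 0 then rm.1.foldl (pvDelTarget genome rm.2) st
  else st

theorem pvLen_cons (p : String × String) (P : List (String × String)) :
    pvLen (p :: P) = (PySem.Str.len p.2 : Int) + pvLen P := by
  simp [pvLen]

theorem pvLen_append (P Q : List (String × String)) : pvLen (P ++ Q) = pvLen P + pvLen Q := by
  simp [pvLen]

theorem pvReb_append (off : Int) (P Q : List (String × String)) :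
    pvReb off (P ++ Q) = pvReb off P ++ pvReb (off + pvLen P) Q := by
  induction P generalizing off with
  | nil => simp [pvReb, pvLen]
  | cons p ps ih => simp [pvReb, ih, pvLen_cons, add_assoc]

theorem pvRebase_fold (P : List (String × String)) (ts : List (String × Int × Int)) (off : Int) :
    P.foldl (fun st p =>
      (st.1 ++ [(p.1, st.2 + 100, st.2 + (PySem.Str.len p.2 : Int) - 100)], st.2 + (PySem.Str.len p.2 : Int)))
      (ts, off) = (ts ++ pvReb off P, off + pvLen P) := by
  induction P generalizing ts off with
  | nil => simp [pvReb, pvLen]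
  | cons p ps ih =>
    simp only [List.foldl_cons]
    rw [ih]
    simp [pvReb, pvLen_cons, add_assoc]

theorem pvRebase_eq (P : List (String × String)) :
    pvRebase P = (PySem.Str.join "" (P.map (·.2)), pvReb 0 P) := by
  simp only [pvRebase]
  rw [pvRebase_fold]
  simp

-- A's innermost copy loop, over an arbitrary index list (only its length matters)
theorem pvA_copies_amp (genome : String) (t : String × Int × Int) (l : List Int)
    (cg : List String) (ct : List (String × Int × Int)) (gg : List String)
    (gt : List (String × Int × Int)) (ci gi : Int) :
    l.foldl (pvAmpStep genome t) (cg, ct, gg, gt, ci, gi) =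
      (cg, ct, gg ++ (List.replicate l.length (pvPieceOf genome t)).map (·.2),
       gt ++ pvReb gi (List.replicate l.length (pvPieceOf genome t)), ci,
       gi + pvLen (List.replicate l.length (pvPieceOf genome t))) := by
  induction l generalizing gg gt gi with
  | nil => simp [pvReb, pvLen]
  | cons a l ih =>
    simp only [List.foldl_cons, pvAmpStep, List.length_cons, List.replicate_succ]
    rw [ih]
    simp [pvPieceOf, pvReb, pvLen_cons, add_assoc]

theorem pvA_copies_del (genome : String) (t : String × Int × Int) (l : List Int)
    (cg : List String) (ct : List (String × Int × Int)) (gg : List String)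
    (gt : List (String × Int × Int)) (ci gi : Int) :
    l.foldl (pvDelStep genome t) (cg, ct, gg, gt, ci, gi) =
      (cg ++ (List.replicate l.length (pvPieceOf genome t)).map (·.2),
       ct ++ pvReb ci (List.replicate l.length (pvPieceOf genome t)), gg, gt,
       ci + pvLen (List.replicate l.length (pvPieceOf genome t)), gi) := by
  induction l generalizing cg ct ci with
  | nil => simp [pvReb, pvLen]
  | cons a l ih =>
    simp only [List.foldl_cons, pvDelStep, List.length_cons, List.replicate_succ]
    rw [ih]
    simp [pvPieceOf, pvReb, pvLen_cons, add_assoc]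

theorem pvRange_len (n : Int) (hn : 0 < n) : (PySem.List.pyRange 0 n 1).length = n.toNat := by
  have h : n = ((n.toNat : Nat) : Int) := by omega
  rw [h, PySem.List.pyRange_zero_natCast]
  simp
  omega

theorem pvA_region_amp (genome : String) (n : Int) (hn : 0 < n)
    (region : List (String × Int × Int))
    (cg : List String) (ct : List (String × Int × Int)) (gg : List String)
    (gt : List (String × Int × Int)) (ci gi : Int) :
    region.foldl (pvAmpTarget genome n) (cg, ct, gg, gt, ci, gi) =
      (cg, ct, gg ++ (pvRegP genome region n.toNat).map (·.2),
       gt ++ pvReb gi (pvRegP genome region n.toNat), ci,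
       gi + pvLen (pvRegP genome region n.toNat)) := by
  induction region generalizing gg gt gi with
  | nil => simp [pvRegP, pvReb, pvLen]
  | cons t rest ih =>
    simp only [List.foldl_cons, pvAmpTarget]
    rw [pvA_copies_amp, pvRange_len n hn, ih]
    simp [pvRegP, pvReb_append, pvLen_append, add_assoc]

theorem pvA_region_del (genome : String) (n : Int) (hn : n < 0)
    (region : List (String × Int × Int))
    (cg : List String) (ct : List (String × Int × Int)) (gg : List String)
    (gt : List (String × Int × Int)) (ci gi : Int) :
    region.foldl (pvDelTarget genome n) (cg, ct, gg, gt, ci, gi) =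
      (cg ++ (pvRegP genome region (-n).toNat).map (·.2),
       ct ++ pvReb ci (pvRegP genome region (-n).toNat), gg, gt,
       ci + pvLen (pvRegP genome region (-n).toNat), gi) := by
  induction region generalizing cg ct ci with
  | nil => simp [pvRegP, pvReb, pvLen]
  | cons t rest ih =>
    simp only [List.foldl_cons, pvDelTarget]
    have habs : |n| = -n := abs_of_neg hn
    rw [habs, pvA_copies_del, pvRange_len (-n) (by omega), ih]
    simp [pvRegP, pvReb_append, pvLen_append, add_assoc]

-- the main fold over (region, copies) pairs, characterised by the two piece lists
theorem pvZ_fold (genome : String) (L : List (List (String × Int × Int) × Int))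
    (cg : List String) (ct : List (String × Int × Int)) (gg : List String)
    (gt : List (String × Int × Int)) (ci gi : Int) :
    L.foldl (pvZStep genome) (cg, ct, gg, gt, ci, gi) =
      (cg ++ (pvCtrlP genome L).map (·.2), ct ++ pvReb ci (pvCtrlP genome L),
       gg ++ (pvCnvP genome L).map (·.2), gt ++ pvReb gi (pvCnvP genome L),
       ci + pvLen (pvCtrlP genome L), gi + pvLen (pvCnvP genome L)) := by
  induction L generalizing cg ct gg gt ci gi with
  | nil => simp [pvCtrlP, pvCnvP, pvReb, pvLen]
  | cons rm L ih =>
    simp only [List.foldl_cons, pvZStep]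
    by_cases h1 : rm.2 > 0
    · rw [if_pos h1, pvA_region_amp genome rm.2 h1, ih]
      simp [pvCtrlP, pvCnvP, h1, not_lt.mpr (le_of_lt h1), pvReb_append, pvLen_append, add_assoc]
    · rw [if_neg h1]
      by_cases h2 : rm.2 < 0
      · rw [if_pos h2, pvA_region_del genome rm.2 h2, ih]
        simp [pvCtrlP, pvCnvP, h2, h1, pvReb_append, pvLen_append, add_assoc]
      · rw [if_neg h2, ih]
        simp [pvCtrlP, pvCnvP, h1, h2]

-- A walks enumerate(cnv_matrix) and looks each index up in mask; under Pre_ that is the zip fold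
theorem pvA_enum_eq_zip (genome : String) (mask : List Int)
    (xs : List (List (String × Int × Int))) (k : Nat)
    (hk : k + xs.length ≤ mask.length)
    (st : List String × List (String × Int × Int) × List String × List (String × Int × Int) × Int × Int) :
    (PySem.List.enumerate xs (k : Int)).foldl (pvAStep genome mask) st =
      (xs.zip (mask.drop k)).foldl (pvZStep genome) st := by
  induction xs generalizing k st with
  | nil => simp [PySem.List.enumerate_nil]
  | cons x xs ih =>
    have hklt : k < mask.length := by simp at hk; omega
    rw [PySem.List.enumerate_cons, List.drop_eq_getElem_cons hklt]
    simp only [List.zip_cons_cons, List.foldl_cons]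
    have hstep : pvAStep genome mask st ((k : Int), x) = pvZStep genome st (x, mask[k]) := by
      simp only [pvAStep, pvZStep, PySem.List.pyGetD_natCast, List.getD_eq_getElem?_getD,
        List.getElem?_eq_getElem hklt, Option.getD_some]
    rw [hstep]
    have : ((k : Int) + 1) = ((k + 1 : Nat) : Int) := by push_cast; ring
    rw [this, ih (k + 1) (by simp at hk ⊢; omega)]

theorem pvB_region_fold (genome : String) (m : Int) (region : List (String × Int × Int))
    (acc : List (String × String)) :
    region.foldl (fun acc target => acc ++ PySem.List.pyRepeat [pvPieceOf genome target] m) acc =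
      acc ++ pvRegP genome region m.toNat := by
  induction region generalizing acc with
  | nil => simp [pvRegP]
  | cons t rest ih =>
    simp only [List.foldl_cons]
    rw [ih]
    simp [pvRegP, PySem.List.pyRepeat_singleton]

theorem pvB_pieces (genome : String) (L : List (List (String × Int × Int) × Int))
    (a b : List (String × String)) :
    L.foldl (fun ps rm =>
      if rm.2 > 0 then
        (ps.1, rm.1.foldl (fun acc target => acc ++ PySem.List.pyRepeat [pvPieceOf genome target] rm.2) ps.2)
      else if rm.2 < 0 then
        (rm.1.foldl (fun acc target => acc ++ PySem.List.pyRepeat [pvPieceOf genome target] (-rm.2)) ps.1, ps.2)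
      else ps) (a, b) = (a ++ pvCtrlP genome L, b ++ pvCnvP genome L) := by
  induction L generalizing a b with
  | nil => simp [pvCtrlP, pvCnvP]
  | cons rm L ih =>
    simp only [List.foldl_cons]
    by_cases h1 : rm.2 > 0
    · rw [if_pos h1, pvB_region_fold, ih]
      simp [pvCtrlP, pvCnvP, h1, not_lt.mpr (le_of_lt h1)]
    · rw [if_neg h1]
      by_cases h2 : rm.2 < 0
      · rw [if_pos h2, pvB_region_fold, ih]
        simp [pvCtrlP, pvCnvP, h1, h2]
      · rw [if_neg h2, ih]
        simp [pvCtrlP, pvCnvP, h1, h2]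

-- ===== VERDICT (by name: the statement is the Claim_ definition above) =====
theorem simulateCNV_spec : Claim_equal_simulateCNV := by
  intro genome cnv_matrix mask _ hpre
  show _ = _
  have hA : simulateCNV genome cnv_matrix mask =
      (PySem.Str.join "" ((pvCtrlP genome (cnv_matrix.zip mask)).map (·.2)),
       pvReb 0 (pvCtrlP genome (cnv_matrix.zip mask)),
       PySem.Str.join "" ((pvCnvP genome (cnv_matrix.zip mask)).map (·.2)),
       pvReb 0 (pvCnvP genome (cnv_matrix.zip mask))) := by
    unfold simulateCNV
    have h0 : ((0 : Int)) = ((0 : Nat) : Int) := by norm_num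
    rw [h0, pvA_enum_eq_zip genome mask cnv_matrix 0 (by simpa using hpre)]
    rw [List.drop_zero, pvZ_fold]
    simp
  have hB : simulateCNV_alt genome cnv_matrix mask =
      (PySem.Str.join "" ((pvCtrlP genome (cnv_matrix.zip mask)).map (·.2)),
       pvReb 0 (pvCtrlP genome (cnv_matrix.zip mask)),
       PySem.Str.join "" ((pvCnvP genome (cnv_matrix.zip mask)).map (·.2)),
       pvReb 0 (pvCnvP genome (cnv_matrix.zip mask))) := by
    unfold simulateCNV_alt pvBuildPieces
    rw [pvB_pieces]
    simp [pvRebase_eq]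
  rw [hA, hB]
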